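-- pv_equiv track=rewrite | github.com/RusKey97/flask_prime_number | prime_functions.py | split_places
-- ===== SOURCE A (Python) =====
-- def split_places(number):
--     """Разбиение числа по разрядам"""
--     if number is None:
--         return number
--
--     str_number = str(number)
--     res = []  # массив с ответом
--
--     while str_number:
--         res.append(str_number[-3:])
--         str_number = str_number[:-3]
--     return' '.join(reversed(res))
-- ===== SOURCE B (Python) =====
-- def split_places(number):
--     """Разбиение числа по разрядам"""
--     if number is None:
--         return number
--
--     s = str(number)
--     first = len(s) % 3 or 3
--     parts = [s[:first]]
--     for i in range(first, len(s), 3):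
--         parts.append(s[i:i + 3])
--     return ' '.join(parts)
-- ===== Notes on version B (the rewrite author's own statement) =====
-- stated objective: alternative
-- what changed: Single left-to-right indexed pass (leading group size = len % 3 or 3, then fixed 3-char slices) instead of repeatedly slicing triples off the end of a shrinking string and reversing the collected list.
import Mathlib
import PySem

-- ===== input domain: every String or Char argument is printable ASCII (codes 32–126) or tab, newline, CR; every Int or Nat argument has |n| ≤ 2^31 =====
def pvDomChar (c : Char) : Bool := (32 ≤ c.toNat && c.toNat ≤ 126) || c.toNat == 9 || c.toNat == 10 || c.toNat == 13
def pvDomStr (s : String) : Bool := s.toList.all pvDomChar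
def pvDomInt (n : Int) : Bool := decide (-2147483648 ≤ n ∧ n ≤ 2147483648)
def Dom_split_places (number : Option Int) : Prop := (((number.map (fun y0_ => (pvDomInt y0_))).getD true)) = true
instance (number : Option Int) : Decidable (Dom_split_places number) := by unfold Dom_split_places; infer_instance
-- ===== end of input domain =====

-- B groups the digits in ONE forward pass; the equivalence below is about return values only.

-- ===== PORT A =====
-- the while loop: res.append(str_number[-3:]); str_number = str_number[:-3]
def splitA_loop (s : List Char) (res : List (List Char)) : List (List Char) :=
  if h : s = [] then res
  else splitA_loop (PySem.List.slice s none (some (-3)))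
                   (res ++ [PySem.List.slice s (some (-3)) none])
termination_by s.length
decreasing_by
  rw [PySem.List.slice_to_neg_ofNat s 3 (by omega)]
  have hl : 0 < s.length := List.length_pos_iff.mpr h
  simp [List.length_take]; omega

def split_places (number : Option Int) : Option String :=
  match number with
  | none => none
  | some n =>
    some (String.ofList (PySem.Chars.join [' '] (splitA_loop (PySem.Int.toChars n) []).reverse))

-- ===== PORT B =====
def split_places_alt (number : Option Int) : Option String :=
  match number with
  | none => none
  | some n =>
    let s := PySem.Int.toChars n
    let first : Nat := if s.length % 3 = 0 then 3 else s.length % 3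
    let parts : List (List Char) :=
      (PySem.List.pyRange (first : Int) (s.length : Int) 3).foldl
        (fun acc i => acc ++ [PySem.List.slice s (some i) (some (i + 3))])
        [PySem.List.slice s none (some (first : Int))]
    some (String.ofList (PySem.Chars.join [' '] parts))

-- ===== PRECONDITION & SPEC =====
def Spec_split_places (number : Option Int) (out : Option String) : Prop := out = split_places_alt number
instance (number : Option Int) (out : Option String) : Decidable (Spec_split_places number out) := by unfold Spec_split_places; infer_instance

-- ===== CLAIM (what is proved, stated in full; the proofs are below) =====
def Claim_equal_split_places : Prop := ∀ (number : Option Int), Dom_split_places number → Spec_split_places number (split_places number)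

-- ===== LEMMAS AND PROOFS =====

-- A's loop, without the accumulator: the chunks in front-to-back order.
def chunksH (s : List Char) : List (List Char) :=
  if h : s = [] then []
  else chunksH (s.take (s.length - 3)) ++ [s.drop (s.length - 3)]
termination_by s.length
decreasing_by
  have hl : 0 < s.length := List.length_pos_iff.mpr h
  simp [List.length_take]; omega

theorem splitA_loop_eq (s : List Char) (res : List (List Char)) :
    splitA_loop s res = res ++ (chunksH s).reverse := by
  induction s, res using splitA_loop.induct with
  | case1 res => rw [splitA_loop, chunksH]; simp
  | case2 s res hs ih =>
    rw [splitA_loop, chunksH]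
    simp only [hs, dite_false]
    rw [ih, PySem.List.slice_to_neg_ofNat s 3 (by omega),
        PySem.List.slice_from_neg_ofNat s 3 (by omega)]
    simp

theorem slice_take_of_le (s : List Char) (m : Nat) (i : Int) (hi : 0 ≤ i) (h3 : i + 3 ≤ (m : Int)) :
    PySem.List.slice (s.take m) (some i) (some (i + 3)) = PySem.List.slice s (some i) (some (i + 3)) := by
  rw [PySem.List.slice_toNat _ hi (by omega), PySem.List.slice_toNat _ hi (by omega),
      List.drop_take, List.take_take]
  congr 1
  omega

theorem chunksH_eq (N : Nat) : ∀ s : List Char, s.length = N → s ≠ [] →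
    chunksH s =
      PySem.List.slice s none (some ((if s.length % 3 = 0 then 3 else s.length % 3 : Nat) : Int)) ::
        (PySem.List.pyRange ((if s.length % 3 = 0 then 3 else s.length % 3 : Nat) : Int) (s.length : Int) 3).map
          (fun i => PySem.List.slice s (some i) (some (i + 3))) := by
  induction N using Nat.strong_induction_on with
  | _ N ih =>
  intro s hN hne
  have hl : 0 < s.length := List.length_pos_iff.mpr hne
  set len := s.length with hlen
  set f : Nat := if len % 3 = 0 then 3 else len % 3 with hf
  have hf1 : 1 ≤ f := by rw [hf]; split <;> omega
  have hf3 : f ≤ 3 := by rw [hf]; split <;> omega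
  have hfm : ((len : Int) - (f : Int)) % 3 = 0 := by
    rw [hf]; split <;> push_cast <;> omega
  by_cases hle : len ≤ 3
  · -- single chunk
    have hfl : f = len := by rw [hf]; split <;> omega
    rw [chunksH]
    simp only [hne, dite_false]
    have h0 : len - 3 = 0 := by omega
    rw [← hlen, h0]
    rw [List.take_zero, List.drop_zero, chunksH]
    simp only [dite_true]
    rw [hfl, PySem.List.pyRange_of_pos _ _ (by omega : (0:Int) < 3),
        PySem.List.slice_to _ (Int.natCast_nonneg _)]
    have hlt : ¬ ((len : Int) < (len : Int)) := by omega
    simp only [hlt, if_false, List.range_zero, List.map_nil]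
    rw [Int.toNat_natCast, hlen, List.take_length]
    simp
  · -- recursive case
    have hlen4 : 4 ≤ len := by omega
    set m := len - 3 with hm
    have htl : (s.take m).length = m := by simp [List.length_take]; omega
    have htne : s.take m ≠ [] := by
      intro h; have := congrArg List.length h; simp [htl] at this; omega
    have hfm' : (if (s.take m).length % 3 = 0 then 3 else (s.take m).length % 3) = f := by
      rw [htl, hf]; have : m % 3 = len % 3 := by omega
      rw [this]
    rw [chunksH]
    simp only [hne, dite_false]
    rw [← hlen, ← hm]
    rw [ih m (by omega) (s.take m) htl htne, hfm', htl]
    have hfm2 : (f : Int) ≤ (m : Int) := by omega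
    rw [PySem.List.pyRange_of_pos (f : Int) (m : Int) (by omega : (0:Int) < 3),
        PySem.List.pyRange_of_pos (f : Int) (len : Int) (by omega : (0:Int) < 3)]
    have hcnt : (if (f : Int) < (len : Int) then (((len : Int) - f + 3 - 1) / 3).toNat else 0)
        = (if (f : Int) < (m : Int) then (((m : Int) - f + 3 - 1) / 3).toNat else 0) + 1 := by
      have h1 : ((f : Int) < (len : Int)) := by omega
      simp only [h1, if_true]
      split <;> omega
    rw [hcnt, List.range_succ]
    set cntT := (if (f : Int) < (m : Int) then (((m : Int) - f + 3 - 1) / 3).toNat else 0) with hcT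
    have hlast : (f : Int) + 3 * (cntT : Int) = (m : Int) := by
      rw [hcT]; split <;> omega
    have hhead : PySem.List.slice (s.take m) none (some (f : Int)) = PySem.List.slice s none (some (f : Int)) := by
      rw [PySem.List.slice_to _ (Int.natCast_nonneg _), PySem.List.slice_to _ (Int.natCast_nonneg _),
          List.take_take]
      congr 1
      omega
    have hdrop : PySem.List.slice s (some ((f : Int) + 3 * (cntT : Int))) (some ((f : Int) + 3 * (cntT : Int) + 3)) = s.drop m := by
      rw [hlast, PySem.List.slice_toNat _ (by omega) (by omega)]
      have h1 : ((m : Int) + 3).toNat - ((m : Int)).toNat = 3 := by omega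
      have h2 : ((m : Int)).toNat = m := by omega
      rw [h1, h2]
      apply List.take_of_length_le
      simp [List.length_drop]; omega
    rw [List.map_map, List.map_map, List.map_append]
    simp only [List.map_cons, List.map_nil, List.cons_append]
    rw [hhead]
    congr 1
    congr 1
    · apply List.map_congr_left
      intro k hk
      have hk' : k < cntT := List.mem_range.mp hk
      simp only [Function.comp_apply]
      exact slice_take_of_le s m _ (by omega) (by omega)
    · simp only [Function.comp_apply]
      rw [hdrop]

theorem toChars_ne_nil (n : Int) : PySem.Int.toChars n ≠ [] := by
  unfold PySem.Int.toChars
  split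
  · simp
  · have : 0 < (Nat.toDigits 10 n.toNat).length := Nat.length_toDigits_pos
    intro h; simp [h] at this

-- ===== VERDICT (by name: the statement is the Claim_ definition above) =====
theorem split_places_spec : Claim_equal_split_places := by
  intro number _
  unfold Spec_split_places split_places split_places_alt
  cases number with
  | none => rfl
  | some n =>
    simp only
    rw [splitA_loop_eq, PySem.List.foldl_append_singleton_eq_map, List.nil_append,
        List.reverse_reverse, List.singleton_append,
        chunksH_eq (PySem.Int.toChars n).length _ rfl (toChars_ne_nil n)]
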